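-- pv_equiv track=rewrite | github.com/hannah-scott/advent-of-code-2021 | day-12.py | getNodeCounts
-- ===== SOURCE A (Python) =====
-- def getNodeCounts(path):
--     count = {}
--     for node in path:
--         if node in count.keys():
--             count[node] += 1
--         else:
--             count[node] = 1
--     return count
-- ===== SOURCE B (Python) =====
-- def getNodeCounts(path):
--     # Build the distinct nodes in first-occurrence order, then count each with a scan.
--     return {node: path.count(node) for node in dict.fromkeys(path)}
-- ===== Notes on version B (the rewrite author's own statement) =====
-- stated objective: idiomatic
-- what changed: Replaces the single accumulating dict pass with a build-the-distinct-keys-then-count strategy: a dict comprehension over dict.fromkeys(path) that counts each distinct node with path.count(node).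
import Mathlib
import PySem

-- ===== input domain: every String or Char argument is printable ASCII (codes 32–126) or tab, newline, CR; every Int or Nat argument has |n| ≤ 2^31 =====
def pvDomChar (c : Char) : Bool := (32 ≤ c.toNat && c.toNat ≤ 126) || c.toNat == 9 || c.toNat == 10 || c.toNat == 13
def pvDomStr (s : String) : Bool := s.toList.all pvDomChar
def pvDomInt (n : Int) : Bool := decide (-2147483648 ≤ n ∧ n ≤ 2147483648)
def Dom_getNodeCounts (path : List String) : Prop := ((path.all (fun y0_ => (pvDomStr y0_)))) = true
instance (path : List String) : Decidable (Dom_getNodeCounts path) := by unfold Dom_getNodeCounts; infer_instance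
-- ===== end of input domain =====

-- B builds the distinct keys first and counts each by a scan; A accumulates a dict in one pass (objective: idiomatic).

-- ===== PORT A =====
-- one accumulating pass: increment if present, else set to 1
def getNodeCounts (path : List String) : List (String × Int) :=
  (path.foldl (fun (count : PySem.Dict String Int) node =>
      if count.contains node then count.insert node (count.getD node 0 + 1)
      else count.insert node 1)
    PySem.Dict.empty).items

-- ===== PORT B =====
-- dict comprehension over dict.fromkeys(path) (= ordered dedup), counting each node with path.count(node)
def getNodeCounts_alt (path : List String) : List (String × Int) :=
  (PySem.List.dedup path).map (fun node => (node, PySem.List.count path node))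

-- ===== PRECONDITION & SPEC =====
def Spec_getNodeCounts (path : List String) (out : List (String × Int)) : Prop := out = getNodeCounts_alt path
instance (path : List String) (out : List (String × Int)) : Decidable (Spec_getNodeCounts path out) := by unfold Spec_getNodeCounts; infer_instance

-- ===== CLAIM (what is proved, stated in full; the proofs are below) =====
def Claim_equal_getNodeCounts : Prop := ∀ (path : List String), Dom_getNodeCounts path → Spec_getNodeCounts path (getNodeCounts path)

-- ===== LEMMAS AND PROOFS =====

-- A's fold step coincides with the Counter step: when the key is absent, getD is 0, so both branches insert getD+1.
theorem getNodeCounts_foldl_eq_counter (path : List String) :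
    path.foldl (fun (count : PySem.Dict String Int) node =>
        if count.contains node then count.insert node (count.getD node 0 + 1)
        else count.insert node 1) PySem.Dict.empty
      = PySem.Dict.counter path := by
  rw [← PySem.Dict.foldl_insert_getD_add_one_eq_counter]
  apply PySem.List.foldl_congr_mem
  intro d x _
  by_cases h : d.contains x
  · simp [h]
  · have h0 : d.getD x 0 = 0 :=
      PySem.Dict.getD_of_not_contains d 0 (Bool.not_eq_true _ ▸ h)
    simp [h, h0]

-- ===== VERDICT (by name: the statement is the Claim_ definition above) =====
theorem getNodeCounts_spec : Claim_equal_getNodeCounts := by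
  intro path _
  show getNodeCounts path = getNodeCounts_alt path
  rw [getNodeCounts, getNodeCounts_foldl_eq_counter, PySem.Dict.items_counter,
    getNodeCounts_alt]
  simp [PySem.List.count_eq]
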